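-- pv_equiv track=rewrite | github.com/connor-mccarthy/algorithms-specialization-stanford | src/course2/week4/two_sum_assignment/two_sum_assignment.py | hash_table_2_sum
-- ===== SOURCE A (Python) =====
-- from typing import Dict, List
--
-- Array = List[int]
--
-- def create_hash_table_from_array(array: Array) -> Dict[int, bool]:
--     hash_table: Dict[int, bool] = {}
--     for e in array:
--         hash_table[e] = True
--     return hash_table
--
-- def hash_table_2_sum(array: Array, target_start: int, target_end: int):
--     # deduping the array makes the search space smaller
--     array = list(set(array))
--     hash_table = create_hash_table_from_array(array)
--     targets = set()
--     for t in range(target_start, target_end + 1):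
--         for e in array:
--             if (e != t - e) and (
--                 hash_table.get(t - e, False)
--             ):  # put e != t-e first so that and evaluation fails fast
--                 targets.add(t)
--     return len(targets)
-- ===== SOURCE B (Python) =====
-- def hash_table_2_sum(array, target_start, target_end):
--     # Enumerate sums of pairs of distinct values directly instead of scanning
--     # every candidate target against a hash table.
--     vals = list(set(array))
--     sums = set()
--     for x in vals:
--         for y in vals:
--             if x != y and target_start <= x + y <= target_end:
--                 sums.add(x + y)
--     return len(sums)
-- ===== Notes on version B (the rewrite author's own statement) =====
-- stated objective: alternative
-- what changed: B enumerates pairs of distinct values and collects their in-range sums (O(n^2)), instead of A's scan of every target t in [start,end] testing t-e against a hash table (O((end-start)*n)).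
import Mathlib
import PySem

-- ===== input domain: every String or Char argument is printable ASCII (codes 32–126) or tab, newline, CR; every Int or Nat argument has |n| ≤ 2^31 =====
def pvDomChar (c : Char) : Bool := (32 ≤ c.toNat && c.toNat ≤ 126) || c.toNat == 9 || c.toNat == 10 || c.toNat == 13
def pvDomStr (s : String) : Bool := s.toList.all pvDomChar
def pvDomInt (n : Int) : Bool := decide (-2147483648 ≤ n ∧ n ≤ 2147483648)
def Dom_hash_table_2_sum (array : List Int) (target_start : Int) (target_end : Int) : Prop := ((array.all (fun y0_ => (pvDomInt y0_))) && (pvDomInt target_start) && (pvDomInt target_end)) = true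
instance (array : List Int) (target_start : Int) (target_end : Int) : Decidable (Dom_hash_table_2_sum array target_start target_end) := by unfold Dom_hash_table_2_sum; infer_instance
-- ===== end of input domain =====

-- B replaces A's scan of every candidate target in [target_start, target_end] against a
-- hash table by a direct enumeration of sums of pairs of distinct values (alternative
-- algorithm; cost O(n^2) instead of O((target_end - target_start) * n)).

-- ===== PORT A =====
def create_hash_table_from_array (array : List Int) : PySem.Dict Int Bool :=
  array.foldl (fun hash_table e => hash_table.insert e true) PySem.Dict.empty

def hash_table_2_sum (array : List Int) (target_start : Int) (target_end : Int) : Int :=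
  -- array = list(set(array)); the count returned is independent of the iteration order
  let arr := PySem.Set.ofList array
  let hash_table := create_hash_table_from_array arr
  let targets :=
    (PySem.List.pyRange target_start (target_end + 1) 1).foldl
      (fun targets t =>
        arr.foldl
          (fun targets e =>
            if e ≠ t - e ∧ hash_table.getD (t - e) false = true then
              PySem.Set.add targets t
            else targets)
          targets)
      PySem.Set.empty
  PySem.Set.len targets

-- ===== PORT B =====
def hash_table_2_sum_alt (array : List Int) (target_start : Int) (target_end : Int) : Int :=
  let vals := PySem.Set.ofList array
  let sums :=
    vals.foldl
      (fun sums x =>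
        vals.foldl
          (fun sums y =>
            if x ≠ y ∧ target_start ≤ x + y ∧ x + y ≤ target_end then
              PySem.Set.add sums (x + y)
            else sums)
          sums)
      PySem.Set.empty
  PySem.Set.len sums

-- ===== PRECONDITION & SPEC =====
def Spec_hash_table_2_sum (array : List Int) (target_start : Int) (target_end : Int) (out : Int) : Prop := out = hash_table_2_sum_alt array target_start target_end
instance (array : List Int) (target_start : Int) (target_end : Int) (out : Int) : Decidable (Spec_hash_table_2_sum array target_start target_end out) := by unfold Spec_hash_table_2_sum; infer_instance

-- ===== CLAIM (what is proved, stated in full; the proofs are below) =====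
def Claim_equal_hash_table_2_sum : Prop := ∀ (array : List Int) (target_start : Int) (target_end : Int), Dom_hash_table_2_sum array target_start target_end → Spec_hash_table_2_sum array target_start target_end (hash_table_2_sum array target_start target_end)

-- ===== LEMMAS AND PROOFS =====

-- getD after the insert-True loop is membership in the inserted list
theorem getD_insert_true_loop (arr : List Int) (d : PySem.Dict Int Bool) (k : Int) :
    ((arr.foldl (fun h e => h.insert e true) d).getD k false = true) ↔
      (k ∈ arr ∨ d.getD k false = true) := by
  induction arr generalizing d with
  | nil => simp
  | cons a l ih =>
    simp only [List.foldl_cons, ih, List.mem_cons, PySem.Dict.getD_insert]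
    by_cases h : k = a <;> simp [h]

-- membership in a conditional-add fold
theorem mem_foldl_ite_add (l s : List Int) (c : Int → Prop) [DecidablePred c]
    (f : Int → Int) (k : Int) :
    k ∈ l.foldl (fun s x => if c x then PySem.Set.add s (f x) else s) s ↔
      k ∈ s ∨ ∃ x ∈ l, c x ∧ f x = k := by
  induction l generalizing s with
  | nil => simp
  | cons a l ih =>
    simp only [List.foldl_cons, ih, List.mem_cons]
    by_cases h : c a
    · simp [h, PySem.Set.mem_add]
      try tauto
    · simp [h]
      try tauto

-- a conditional-add fold keeps the accumulator Nodup
theorem nodup_foldl_ite_add (l : List Int) (s : List Int) (c : Int → Prop)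
    [DecidablePred c] (f : Int → Int) (hs : s.Nodup) :
    (l.foldl (fun s x => if c x then PySem.Set.add s (f x) else s) s).Nodup := by
  induction l generalizing s with
  | nil => exact hs
  | cons a l ih =>
    simp only [List.foldl_cons]
    by_cases h : c a
    · simp only [h, if_true]
      exact ih _ (PySem.Set.nodup_add s (f a) hs)
    · simp only [h, if_false]
      exact ih _ hs

-- membership in A's target set
theorem memA (L arr : List Int) (ht : PySem.Dict Int Bool) (s : List Int) (k : Int) :
    k ∈ L.foldl
        (fun tg t =>
          arr.foldl
            (fun tg e =>
              if e ≠ t - e ∧ ht.getD (t - e) false = true then PySem.Set.add tg t else tg)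
            tg)
        s ↔
      k ∈ s ∨ ∃ t ∈ L, k = t ∧ ∃ e ∈ arr, e ≠ t - e ∧ ht.getD (t - e) false = true := by
  induction L generalizing s with
  | nil => simp
  | cons t L ih =>
    simp only [List.foldl_cons, ih, List.mem_cons]
    rw [mem_foldl_ite_add arr s (fun e => e ≠ t - e ∧ ht.getD (t - e) false = true)
          (fun _ => t) k]
    constructor
    · rintro (⟨h | ⟨e, he, hc, rfl⟩⟩ | ⟨t', ht', rfl, e, he, hc⟩)
      · exact Or.inl h
      · exact Or.inr ⟨t, Or.inl rfl, rfl, e, he, hc⟩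
      · exact Or.inr ⟨k, Or.inr ht', rfl, e, he, hc⟩
    · rintro (h | ⟨t', (rfl | ht'), rfl, e, he, hc⟩)
      · exact Or.inl (Or.inl h)
      · exact Or.inl (Or.inr ⟨e, he, hc, rfl⟩)
      · exact Or.inr ⟨k, ht', rfl, e, he, hc⟩

theorem nodupA (L arr : List Int) (ht : PySem.Dict Int Bool) (s : List Int)
    (hs : s.Nodup) :
    (L.foldl
        (fun tg t =>
          arr.foldl
            (fun tg e =>
              if e ≠ t - e ∧ ht.getD (t - e) false = true then PySem.Set.add tg t else tg)
            tg)
        s).Nodup := by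
  induction L generalizing s with
  | nil => exact hs
  | cons t L ih =>
    exact ih _ (nodup_foldl_ite_add arr s
      (fun e => e ≠ t - e ∧ ht.getD (t - e) false = true) (fun _ => t) hs)

-- membership in B's sum set
theorem memB (L V : List Int) (ts te : Int) (s : List Int) (k : Int) :
    k ∈ L.foldl
        (fun sums x =>
          V.foldl
            (fun sums y =>
              if x ≠ y ∧ ts ≤ x + y ∧ x + y ≤ te then PySem.Set.add sums (x + y) else sums)
            sums)
        s ↔
      k ∈ s ∨ ∃ x ∈ L, ∃ y ∈ V, (x ≠ y ∧ ts ≤ x + y ∧ x + y ≤ te) ∧ x + y = k := by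
  induction L generalizing s with
  | nil => simp
  | cons x L ih =>
    simp only [List.foldl_cons, ih, List.mem_cons]
    rw [mem_foldl_ite_add V s (fun y => x ≠ y ∧ ts ≤ x + y ∧ x + y ≤ te)
          (fun y => x + y) k]
    constructor
    · rintro (⟨h | ⟨y, hy, hc, hk⟩⟩ | ⟨x', hx', y, hy, hc, hk⟩)
      · exact Or.inl h
      · exact Or.inr ⟨x, Or.inl rfl, y, hy, hc, hk⟩
      · exact Or.inr ⟨x', Or.inr hx', y, hy, hc, hk⟩
    · rintro (h | ⟨x', (rfl | hx'), y, hy, hc, hk⟩)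
      · exact Or.inl (Or.inl h)
      · exact Or.inl (Or.inr ⟨y, hy, hc, hk⟩)
      · exact Or.inr ⟨x', hx', y, hy, hc, hk⟩

theorem nodupB (L V : List Int) (ts te : Int) (s : List Int) (hs : s.Nodup) :
    (L.foldl
        (fun sums x =>
          V.foldl
            (fun sums y =>
              if x ≠ y ∧ ts ≤ x + y ∧ x + y ≤ te then PySem.Set.add sums (x + y) else sums)
            sums)
        s).Nodup := by
  induction L generalizing s with
  | nil => exact hs
  | cons x L ih =>
    exact ih _ (nodup_foldl_ite_add V s
      (fun y => x ≠ y ∧ ts ≤ x + y ∧ x + y ≤ te) (fun y => x + y) hs)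

-- ===== VERDICT (by name: the statement is the Claim_ definition above) =====
theorem hash_table_2_sum_spec : Claim_equal_hash_table_2_sum := by
  intro array target_start target_end _
  unfold Spec_hash_table_2_sum hash_table_2_sum hash_table_2_sum_alt
    create_hash_table_from_array
  have hA := memA (PySem.List.pyRange target_start (target_end + 1) 1)
    (PySem.Set.ofList array)
    ((PySem.Set.ofList array).foldl (fun h e => h.insert e true) PySem.Dict.empty)
    PySem.Set.empty
  have hB := memB (PySem.Set.ofList array) (PySem.Set.ofList array)
    target_start target_end PySem.Set.empty
  have hperm :
      (List.foldl
          (fun tg t =>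
            (PySem.Set.ofList array).foldl
              (fun tg e =>
                if e ≠ t - e ∧
                    (((PySem.Set.ofList array).foldl
                        (fun h e => h.insert e true) PySem.Dict.empty).getD (t - e) false) =
                      true then
                  PySem.Set.add tg t
                else tg)
              tg)
          PySem.Set.empty
          (PySem.List.pyRange target_start (target_end + 1) 1)).Perm
        (List.foldl
          (fun sums x =>
            (PySem.Set.ofList array).foldl
              (fun sums y =>
                if x ≠ y ∧ target_start ≤ x + y ∧ x + y ≤ target_end then
                  PySem.Set.add sums (x + y)
                else sums)
              sums)
          PySem.Set.empty (PySem.Set.ofList array)) := by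
    rw [List.perm_ext_iff_of_nodup
        (nodupA _ _ _ _ (by simp [PySem.Set.empty]))
        (nodupB _ _ _ _ _ (by simp [PySem.Set.empty]))]
    intro k
    rw [hA k, hB k]
    simp only [PySem.Set.empty, List.not_mem_nil, false_or]
    constructor
    · rintro ⟨t, htmem, rfl, e, he, hne, hget⟩
      have hrange := PySem.List.mem_pyRange_one.mp htmem
      have hmem : (k - e) ∈ PySem.Set.ofList array := by
        have := (getD_insert_true_loop (PySem.Set.ofList array) PySem.Dict.empty
          (k - e)).mp hget
        rcases this with h | h
        · exact h
        · simp [PySem.Dict.getD_empty] at h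
      exact ⟨e, he, k - e, hmem, ⟨hne, by omega, by omega⟩, by omega⟩
    · rintro ⟨x, hx, y, hy, ⟨hne, h1, h2⟩, hk⟩
      refine ⟨k, PySem.List.mem_pyRange_one.mpr ⟨by omega, by omega⟩, rfl, x, hx, ?_, ?_⟩
      · omega
      · have hy' : k - x = y := by omega
        rw [hy']
        exact (getD_insert_true_loop (PySem.Set.ofList array) PySem.Dict.empty y).mpr
          (Or.inl hy)
  simp only [PySem.Set.len]
  exact_mod_cast hperm.length_eq
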